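-- pv_equiv track=rewrite | github.com/Sakurajima98/MortisFun | service/gallery_service.py | _guess_ext
-- ===== SOURCE A (Python) =====
-- def _guess_ext(ref: str) -> str:
--     """
--     猜测图片扩展名；若无法判断，默认 `jpg`。
--
--     Args:
--         ref (str): URL 或 文件路径字符串
--
--     Returns:
--         str: 扩展名（不含点）
--     """
--     try:
--         s = (ref or '').lower()
--         for ext in ['jpg', 'jpeg', 'png', 'gif', 'webp', 'bmp']:
--             if s.endswith('.' + ext):
--                 return 'jpg' if ext == 'jpeg' else ext
--         return 'jpg'
--     except Exception:
--         return 'jpg'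
-- ===== SOURCE B (Python) =====
-- _EXT_MAP = {'jpg': 'jpg', 'jpeg': 'jpg', 'png': 'png', 'gif': 'gif', 'webp': 'webp', 'bmp': 'bmp'}
--
--
-- def _guess_ext(ref: str) -> str:
--     try:
--         s = (ref or '').lower()
--         if '.' not in s:
--             return 'jpg'
--         ext = s.rsplit('.', 1)[1]
--         return _EXT_MAP.get(ext, 'jpg')
--     except Exception:
--         return 'jpg'
-- ===== Notes on version B (the rewrite author's own statement) =====
-- stated objective: idiomatic
-- what changed: Instead of looping over six candidate extensions testing endswith on each, B extracts the suffix after the last dot once (rsplit) and looks it up in a small extension map, falling back to the default extension.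
import Mathlib
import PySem

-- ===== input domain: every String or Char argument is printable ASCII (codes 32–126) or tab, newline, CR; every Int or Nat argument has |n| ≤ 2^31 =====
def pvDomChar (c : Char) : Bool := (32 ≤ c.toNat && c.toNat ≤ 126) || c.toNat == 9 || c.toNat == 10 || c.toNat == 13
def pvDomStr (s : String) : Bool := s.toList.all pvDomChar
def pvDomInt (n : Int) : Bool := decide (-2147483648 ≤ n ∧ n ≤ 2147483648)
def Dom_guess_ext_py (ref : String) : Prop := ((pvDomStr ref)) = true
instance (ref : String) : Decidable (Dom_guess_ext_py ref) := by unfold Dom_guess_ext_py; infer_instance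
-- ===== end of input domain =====

-- B replaces A's endswith loop over six candidate extensions by extracting the suffix
-- after the last dot once and looking it up in a small extension map (objective: idiomatic).

-- ===== PORT A =====
-- the "for ext in [...]" loop with its early returns, as structural recursion
def pvExtLoop (s : List Char) : List (List Char) → String
  | [] => "jpg"
  | e :: rest =>
      if PySem.Chars.endswith s ('.' :: e) then
        (if e = "jpeg".toList then "jpg" else String.ofList e)
      else pvExtLoop s rest

def guess_ext_py (ref : String) : String :=
  let s := PySem.Str.lower ref
  pvExtLoop s.toList ["jpg".toList, "jpeg".toList, "png".toList, "gif".toList, "webp".toList, "bmp".toList]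

-- ===== PORT B =====
def pvExtMap : PySem.Dict (List Char) String :=
  PySem.Dict.ofList [("jpg".toList, "jpg"), ("jpeg".toList, "jpg"), ("png".toList, "png"),
                     ("gif".toList, "gif"), ("webp".toList, "webp"), ("bmp".toList, "bmp")]

def guess_ext_py_alt (ref : String) : String :=
  let s := (PySem.Str.lower ref).toList
  if PySem.Chars.isIn ['.'] s then
    -- s.rsplit('.', 1)[1], ported by hand (exact): the characters after the last '.'
    let ext := (s.reverse.takeWhile (· ≠ '.')).reverse
    PySem.Dict.getD pvExtMap ext "jpg"
  else "jpg"

-- ===== PRECONDITION & SPEC =====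
def Spec_guess_ext_py (ref : String) (out : String) : Prop := out = guess_ext_py_alt ref
instance (ref : String) (out : String) : Decidable (Spec_guess_ext_py ref out) := by unfold Spec_guess_ext_py; infer_instance

-- ===== CLAIM (what is proved, stated in full; the proofs are below) =====
def Claim_equal_guess_ext_py : Prop := ∀ (ref : String), Dom_guess_ext_py ref → Spec_guess_ext_py ref (guess_ext_py ref)

-- ===== LEMMAS AND PROOFS =====

-- (er ++ ['.']) is a prefix of rl  ↔  rl contains a '.' and its part before the first '.' is er
theorem pv_prefix_dot_iff (er : List Char) (he : '.' ∉ er) :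
    ∀ rl : List Char, ((er ++ ['.']) <+: rl ↔ ('.' ∈ rl ∧ rl.takeWhile (· ≠ '.') = er)) := by
  induction er with
  | nil =>
    intro rl
    cases rl with
    | nil => simp
    | cons c t =>
      by_cases hc : c = '.'
      · subst hc
        simp [List.cons_prefix_cons]
      · simp [List.cons_prefix_cons, hc, Ne.symm hc]
  | cons a er ih =>
    have ha : a ≠ '.' := fun h => he (h ▸ List.mem_cons_self)
    have he' : '.' ∉ er := fun h => he (List.mem_cons_of_mem _ h)
    intro rl
    cases rl with
    | nil => simp
    | cons c t =>
      by_cases hc : c = a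
      · subst hc
        simp only [List.cons_append, List.cons_prefix_cons, true_and,
          List.takeWhile_cons, List.mem_cons, ih he' t]
        simp [ha, Ne.symm ha]
      · constructor
        · intro h
          exact (hc ((List.cons_prefix_cons.mp h).1).symm).elim
        · rintro ⟨-, h⟩
          by_cases hd : c = '.'
          · subst hd; simp at h
          · simp [hd] at h
            exact absurd h.1 hc

theorem pv_endswith_iff (s e : List Char) (he : '.' ∉ e) :
    PySem.Chars.endswith s ('.' :: e) = true ↔
      ('.' ∈ s ∧ (s.reverse.takeWhile (· ≠ '.')).reverse = e) := by
  rw [PySem.Chars.endswith_iff, ← List.reverse_prefix]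
  have hrev : ('.' :: e).reverse = e.reverse ++ ['.'] := by simp
  rw [hrev, pv_prefix_dot_iff e.reverse (by simpa using he) s.reverse]
  constructor
  · rintro ⟨h1, h2⟩
    exact ⟨by simpa using h1, by rw [h2]; simp⟩
  · rintro ⟨h1, h2⟩
    refine ⟨by simpa using h1, ?_⟩
    have := congrArg List.reverse h2
    simpa using this

theorem pv_core (l : List Char) :
    pvExtLoop l ["jpg".toList, "jpeg".toList, "png".toList, "gif".toList, "webp".toList, "bmp".toList] =
      (if PySem.Chars.isIn ['.'] l then
        PySem.Dict.getD pvExtMap ((l.reverse.takeWhile (· ≠ '.')).reverse) "jpg"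
      else "jpg") := by
  by_cases hdot : '.' ∈ l
  case pos =>
    have hIn : PySem.Chars.isIn ['.'] l = true := by
      rw [PySem.Chars.isIn_iff_infix, List.singleton_infix_iff]; exact hdot
    set a := (l.reverse.takeWhile (· ≠ '.')).reverse with ha
    have hiff : ∀ e : List Char, '.' ∉ e →
        (PySem.Chars.endswith l ('.' :: e) = true ↔ a = e) := by
      intro e he
      rw [pv_endswith_iff l e he]
      exact ⟨fun h => h.2, fun h => ⟨hdot, h⟩⟩
    have etrue : ∀ e : List Char, '.' ∉ e → a = e → PySem.Chars.endswith l ('.' :: e) = true :=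
      fun e he h => (hiff e he).mpr h
    have efalse : ∀ e : List Char, '.' ∉ e → a ≠ e → PySem.Chars.endswith l ('.' :: e) = false :=
      fun e he h => by rw [← Bool.not_eq_true, hiff e he]; exact h
    simp only [pvExtLoop, hIn, if_true]
    by_cases h1 : a = "jpg".toList
    · rw [etrue _ (by decide) h1, if_pos rfl, h1]; decide
    rw [efalse _ (by decide) h1, if_neg (by simp)]
    by_cases h2 : a = "jpeg".toList
    · rw [etrue _ (by decide) h2, if_pos rfl, h2]; decide
    rw [efalse _ (by decide) h2, if_neg (by simp)]
    by_cases h3 : a = "png".toList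
    · rw [etrue _ (by decide) h3, if_pos rfl, h3]; decide
    rw [efalse _ (by decide) h3, if_neg (by simp)]
    by_cases h4 : a = "gif".toList
    · rw [etrue _ (by decide) h4, if_pos rfl, h4]; decide
    rw [efalse _ (by decide) h4, if_neg (by simp)]
    by_cases h5 : a = "webp".toList
    · rw [etrue _ (by decide) h5, if_pos rfl, h5]; decide
    rw [efalse _ (by decide) h5, if_neg (by simp)]
    by_cases h6 : a = "bmp".toList
    · rw [etrue _ (by decide) h6, if_pos rfl, h6]; decide
    rw [efalse _ (by decide) h6, if_neg (by simp)]
    have k1 : ((['j','p','g'] : List Char) == a) = false := beq_eq_false_iff_ne.mpr fun h => h1 h.symm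
    have k2 : ((['j','p','e','g'] : List Char) == a) = false := beq_eq_false_iff_ne.mpr fun h => h2 h.symm
    have k3 : ((['p','n','g'] : List Char) == a) = false := beq_eq_false_iff_ne.mpr fun h => h3 h.symm
    have k4 : ((['g','i','f'] : List Char) == a) = false := beq_eq_false_iff_ne.mpr fun h => h4 h.symm
    have k5 : ((['w','e','b','p'] : List Char) == a) = false := beq_eq_false_iff_ne.mpr fun h => h5 h.symm
    have k6 : ((['b','m','p'] : List Char) == a) = false := beq_eq_false_iff_ne.mpr fun h => h6 h.symm
    simp [pvExtMap, PySem.Dict.ofList, PySem.Dict.getD, PySem.Dict.get?,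
      PySem.Dict.insert, PySem.Dict.empty, PySem.Dict.update, PySem.Dict.contains,
      List.find?, k1, k2, k3, k4, k5, k6]
  case neg =>
    have hIn : PySem.Chars.isIn ['.'] l = false := by
      rw [PySem.Chars.isIn_eq_false_iff, List.singleton_infix_iff]; exact hdot
    have ef : ∀ e : List Char, '.' ∉ e → PySem.Chars.endswith l ('.' :: e) = false := by
      intro e he
      rw [← Bool.not_eq_true, pv_endswith_iff l e he]
      exact fun h => hdot h.1
    simp only [pvExtLoop, ef _ (by decide : ('.' : Char) ∉ "jpg".toList),
      ef _ (by decide : ('.' : Char) ∉ "jpeg".toList), ef _ (by decide : ('.' : Char) ∉ "png".toList),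
      ef _ (by decide : ('.' : Char) ∉ "gif".toList), ef _ (by decide : ('.' : Char) ∉ "webp".toList),
      ef _ (by decide : ('.' : Char) ∉ "bmp".toList), Bool.false_eq_true, if_false, hIn]

-- ===== VERDICT (by name: the statement is the Claim_ definition above) =====
theorem guess_ext_py_spec : Claim_equal_guess_ext_py := by
  intro ref _
  unfold Spec_guess_ext_py guess_ext_py guess_ext_py_alt
  exact pv_core (PySem.Str.lower ref).toList
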